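-- pv_equiv track=rewrite | github.com/siravvix/envoy-cli | envoy/lint.py | lint_lines
-- ===== SOURCE A (Python) =====
-- from typing import Dict, List, Tuple
--
-- LINT_RULES = [
--     "no_empty_values",
--     "no_duplicate_keys",
--     "no_whitespace_in_keys",
--     "no_unquoted_special_chars",
-- ]
--
-- def lint_lines(lines: List[str], rules: List[str] = None) -> List[Tuple[str, str, str]]:
--     """Lint raw lines to catch issues like duplicate keys."""
--     if rules is None:
--         rules = LINT_RULES
--     issues = []
--     seen = {}
--
--     for lineno, line in enumerate(lines, 1):
--         stripped = line.strip()
--         if not stripped or stripped.startswith("#"):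
--             continue
--         if "=" in stripped:
--             key = stripped.split("=", 1)[0].strip()
--             if "no_duplicate_keys" in rules:
--                 if key in seen:
--                     issues.append((
--                         "no_duplicate_keys", key,
--                         f"Key '{key}' is duplicated (first at line {seen[key]}, again at line {lineno})."
--                     ))
--                 else:
--                     seen[key] = lineno
--
--     return issues
-- ===== SOURCE B (Python) =====
-- from typing import List, Tuple
--
-- LINT_RULES = [
--     "no_empty_values",
--     "no_duplicate_keys",
--     "no_whitespace_in_keys",
--     "no_unquoted_special_chars",
-- ]
--
-- def _key_of(line):
--     s = line.strip()
--     if not s or s.startswith("#") or "=" not in s: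
--         return None
--     return s.split("=", 1)[0].strip()
--
-- def lint_lines(lines: List[str], rules: List[str] = None) -> List[Tuple[str, str, str]]:
--     """Lint raw lines to catch issues like duplicate keys (index-first restructuring)."""
--     if rules is None:
--         rules = LINT_RULES
--     if "no_duplicate_keys" not in rules:
--         return []
--     # pass 1: first line number of every key
--     first = {}
--     for lineno, line in enumerate(lines, 1):
--         k = _key_of(line)
--         if k is not None and k not in first:
--             first[k] = lineno
--     # pass 2: emit an issue for every later occurrence
--     out = []
--     for lineno, line in enumerate(lines, 1):
--         k = _key_of(line)
--         if k is not None and first[k] < lineno: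
--             out.append((
--                 "no_duplicate_keys", k,
--                 f"Key '{k}' is duplicated (first at line {first[k]}, again at line {lineno})."
--             ))
--     return out
-- ===== Notes on version B (the rewrite author's own statement) =====
-- stated objective: alternative
-- what changed: Replaces the single pass with an inline seen-dict by an index-first design: pass 1 builds a map from each key to its first line number, pass 2 re-scans the lines and emits an issue whenever the recorded first line is strictly earlier; when the duplicate-key rule is absent it returns the empty issue list up front.
import Mathlib
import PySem

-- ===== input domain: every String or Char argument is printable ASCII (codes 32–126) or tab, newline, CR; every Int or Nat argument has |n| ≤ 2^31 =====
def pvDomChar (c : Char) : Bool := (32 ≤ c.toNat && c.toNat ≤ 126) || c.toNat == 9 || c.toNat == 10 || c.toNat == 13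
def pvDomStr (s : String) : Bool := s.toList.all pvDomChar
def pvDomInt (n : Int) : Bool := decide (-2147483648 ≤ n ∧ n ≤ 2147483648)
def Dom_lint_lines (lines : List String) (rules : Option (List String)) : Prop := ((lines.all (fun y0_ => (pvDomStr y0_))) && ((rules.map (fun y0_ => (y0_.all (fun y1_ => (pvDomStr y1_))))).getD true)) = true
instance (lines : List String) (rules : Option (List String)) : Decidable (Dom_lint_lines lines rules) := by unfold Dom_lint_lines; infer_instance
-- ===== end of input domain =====

-- B is an 'alternative' restructuring: an index of first line numbers is built in a first pass,
-- duplicates are emitted in a second pass; same return value as A (no speed claim).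

def LINT_RULES : List String :=
  ["no_empty_values", "no_duplicate_keys", "no_whitespace_in_keys", "no_unquoted_special_chars"]

-- the f-string shared verbatim by both Pythons
def issueMsg (key : String) (first lineno : Int) : String :=
  "Key '" ++ key ++ "' is duplicated (first at line " ++ PySem.Int.toStr first ++
  ", again at line " ++ PySem.Int.toStr lineno ++ ")."

-- ===== PORT A =====
def lint_lines (lines : List String) (rules : Option (List String)) : List (String × String × String) :=
  let rules := rules.getD LINT_RULES
  let st :=
    (PySem.List.enumerate lines 1).foldl
      (fun (st : List (String × String × String) × PySem.Dict String Int) p =>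
        let lineno := p.1
        let line := p.2
        let stripped := PySem.Str.strip line
        if stripped = "" ∨ PySem.Str.startswith stripped "#" then st
        else if PySem.Str.isIn "=" stripped then
          let key := PySem.Str.strip (((PySem.Str.splitMax? stripped "=" 1).getD []).headD "")
          if rules.contains "no_duplicate_keys" then
            if st.2.contains key then
              -- seen[key] is guarded by the contains test, so getD is exact here
              (st.1 ++ [("no_duplicate_keys", key, issueMsg key (st.2.getD key 0) lineno)], st.2)
            else (st.1, st.2.insert key lineno)
          else st
        else st)
      ([], PySem.Dict.empty)
  st.1

-- ===== PORT B =====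
-- B's helper _key_of
def keyOf? (line : String) : Option String :=
  if PySem.Str.strip line = "" ∨ PySem.Str.startswith (PySem.Str.strip line) "#" = true
      ∨ ¬ PySem.Str.isIn "=" (PySem.Str.strip line) = true then none
  else some (PySem.Str.strip (((PySem.Str.splitMax? (PySem.Str.strip line) "=" 1).getD []).headD ""))

def lint_lines_alt (lines : List String) (rules : Option (List String)) : List (String × String × String) :=
  let rules := rules.getD LINT_RULES
  if ¬ rules.contains "no_duplicate_keys" then []
  else
    let first :=
      (PySem.List.enumerate lines 1).foldl
        (fun (d : PySem.Dict String Int) p =>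
          match keyOf? p.2 with
          | some k => if d.contains k then d else d.insert k p.1
          | none => d)
        PySem.Dict.empty
    (PySem.List.enumerate lines 1).foldl
      (fun out p =>
        match keyOf? p.2 with
        | some k =>
            -- first[k] is total here: k occurs in the line, so it is in `first`
            if first.getD k 0 < p.1 then
              out ++ [("no_duplicate_keys", k, issueMsg k (first.getD k 0) p.1)]
            else out
        | none => out)
      []

-- ===== PRECONDITION & SPEC =====
def Spec_lint_lines (lines : List String) (rules : Option (List String)) (out : List (String × String × String)) : Prop := out = lint_lines_alt lines rules
instance (lines : List String) (rules : Option (List String)) (out : List (String × String × String)) : Decidable (Spec_lint_lines lines rules out) := by unfold Spec_lint_lines; infer_instance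

-- ===== CLAIM (what is proved, stated in full; the proofs are below) =====
def Claim_equal_lint_lines : Prop := ∀ (lines : List String) (rules : Option (List String)), Dom_lint_lines lines rules → Spec_lint_lines lines rules (lint_lines lines rules)

-- ===== LEMMAS AND PROOFS =====

-- A's loop body, abbreviated for the proofs
def stepA (rules : List String) (st : List (String × String × String) × PySem.Dict String Int)
    (p : Int × String) : List (String × String × String) × PySem.Dict String Int :=
  if PySem.Str.strip p.2 = "" ∨ PySem.Str.startswith (PySem.Str.strip p.2) "#" = true then st
  else if PySem.Str.isIn "=" (PySem.Str.strip p.2) = true then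
    if rules.contains "no_duplicate_keys" = true then
      if st.2.contains (PySem.Str.strip (((PySem.Str.splitMax? (PySem.Str.strip p.2) "=" 1).getD []).headD "")) = true then
        (st.1 ++ [("no_duplicate_keys", PySem.Str.strip (((PySem.Str.splitMax? (PySem.Str.strip p.2) "=" 1).getD []).headD ""), issueMsg (PySem.Str.strip (((PySem.Str.splitMax? (PySem.Str.strip p.2) "=" 1).getD []).headD "")) (st.2.getD (PySem.Str.strip (((PySem.Str.splitMax? (PySem.Str.strip p.2) "=" 1).getD []).headD "")) 0) p.1)], st.2)
      else (st.1, st.2.insert (PySem.Str.strip (((PySem.Str.splitMax? (PySem.Str.strip p.2) "=" 1).getD []).headD "")) p.1)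
    else st
  else st

lemma lint_lines_eq_stepA (lines : List String) (rules : Option (List String)) :
    lint_lines lines rules =
      ((PySem.List.enumerate lines 1).foldl (stepA (rules.getD LINT_RULES))
        ([], PySem.Dict.empty)).1 := rfl

-- the A step, rephrased through B's key parser
lemma stepA_eq (rules : List String) (st : List (String × String × String) × PySem.Dict String Int)
    (p : Int × String) :
    stepA rules st p =
      match keyOf? p.2 with
      | none => st
      | some k =>
          if rules.contains "no_duplicate_keys" then
            if st.2.contains k then
              (st.1 ++ [("no_duplicate_keys", k, issueMsg k (st.2.getD k 0) p.1)], st.2)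
            else (st.1, st.2.insert k p.1)
          else st := by
  unfold stepA keyOf?
  by_cases e1 : PySem.Str.strip p.2 = "" <;>
    by_cases e2 : PySem.Str.startswith (PySem.Str.strip p.2) "#" = true <;>
      by_cases e3 : PySem.Str.isIn "=" (PySem.Str.strip p.2) = true <;>
        simp_all

-- pass 1's step and the pass-1 fold from an arbitrary start dict
def stepF (d : PySem.Dict String Int) (p : Int × String) : PySem.Dict String Int :=
  match keyOf? p.2 with
  | some k => if d.contains k then d else d.insert k p.1
  | none => d

def firstFold (rest : List String) (s : Int) (d : PySem.Dict String Int) : PySem.Dict String Int :=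
  (PySem.List.enumerate rest s).foldl stepF d

-- pass 2's step
def stepB (F : PySem.Dict String Int) (out : List (String × String × String))
    (p : Int × String) : List (String × String × String) :=
  match keyOf? p.2 with
  | some k =>
      if F.getD k 0 < p.1 then
        out ++ [("no_duplicate_keys", k, issueMsg k (F.getD k 0) p.1)]
      else out
  | none => out

lemma lint_lines_alt_eq (lines : List String) (rules : Option (List String))
    (hr : (rules.getD LINT_RULES).contains "no_duplicate_keys" = true) :
    lint_lines_alt lines rules =
      (PySem.List.enumerate lines 1).foldl (stepB (firstFold lines 1 PySem.Dict.empty)) [] := by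
  unfold lint_lines_alt
  rw [if_neg (by rw [hr]; simp)]
  rfl

-- pass 1 never changes an entry that is already present
lemma firstFold_preserve (rest : List String) (s : Int) (d : PySem.Dict String Int) (k : String)
    (hk : d.contains k = true) :
    (firstFold rest s d).contains k = true ∧ (firstFold rest s d).getD k 0 = d.getD k 0 := by
  induction rest generalizing s d with
  | nil => simp [firstFold, PySem.List.enumerate_nil, hk]
  | cons x xs ih =>
      rw [firstFold, PySem.List.enumerate_cons, List.foldl_cons]
      have : ∀ d' : PySem.Dict String Int, d'.contains k = true → d'.getD k 0 = d.getD k 0 →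
          ((PySem.List.enumerate xs (s+1)).foldl stepF d').contains k = true ∧
          ((PySem.List.enumerate xs (s+1)).foldl stepF d').getD k 0 = d.getD k 0 := by
        intro d' h1 h2
        have := ih (s+1) d' h1
        rw [firstFold] at this
        exact ⟨this.1, this.2.trans h2⟩
      unfold stepF
      cases hko : keyOf? x with
      | none => exact this d hk rfl
      | some k' =>
          simp only
          by_cases hc : d.contains k' = true
          · simp only [hc, if_true]; exact this d hk rfl
          · simp only [hc, if_false, Bool.false_eq_true]
            have hne : k ≠ k' := by rintro rfl; rw [hk] at hc; exact hc rfl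
            refine this (d.insert k' s) ?_ ?_
            · rw [PySem.Dict.contains_insert]; simp [hk]
            · rw [PySem.Dict.getD_insert]; simp [hne]

-- the main invariant: with the duplicate-key rule on, A's one-pass fold from (acc, d)
-- equals B's second pass driven by the completed first-occurrence map, provided every
-- entry of d is an earlier line number
lemma main_inv (rules : List String) (hr : rules.contains "no_duplicate_keys" = true)
    (rest : List String) (s : Int) (d : PySem.Dict String Int)
    (acc : List (String × String × String))
    (hd : ∀ k, d.contains k = true → d.getD k 0 < s) :
    ((PySem.List.enumerate rest s).foldl (stepA rules) (acc, d)).1 =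
      (PySem.List.enumerate rest s).foldl (stepB (firstFold rest s d)) acc := by
  induction rest generalizing s d acc with
  | nil => simp [PySem.List.enumerate_nil]
  | cons x xs ih =>
      rw [PySem.List.enumerate_cons, List.foldl_cons, List.foldl_cons,
          stepA_eq, firstFold, PySem.List.enumerate_cons, List.foldl_cons]
      cases hko : keyOf? x with
      | none =>
          simp only [stepB, hko, stepF]
          exact ih (s+1) d acc (fun k hk => lt_trans (hd k hk) (by omega))
      | some k =>
          simp only [stepB, hko, stepF, hr, if_true]
          by_cases hc : d.contains k = true
          · -- duplicate: A emits with d's entry; B emits with the preserved map entry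
            have hpres := firstFold_preserve xs (s+1) d k hc
            rw [firstFold] at hpres
            simp only [hc, if_true]
            have hlt : ((PySem.List.enumerate xs (s+1)).foldl stepF d).getD k 0 < s := by
              rw [hpres.2]; exact hd k hc
            rw [if_pos hlt, hpres.2]
            exact ih (s+1) d _ (fun k' hk' => lt_trans (hd k' hk') (by omega))
          · -- first occurrence: A records it; B's map says first = s, no emission
            simp only [hc, if_false, Bool.false_eq_true]
            have hpres := firstFold_preserve xs (s+1) (d.insert k s) k
              (by rw [PySem.Dict.contains_insert]; simp)
            rw [firstFold] at hpres
            have hv : ((PySem.List.enumerate xs (s+1)).foldl stepF (d.insert k s)).getD k 0 = s := by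
              rw [hpres.2, PySem.Dict.getD_insert]; simp
            rw [if_neg (by rw [hv]; omega)]
            refine ih (s+1) (d.insert k s) acc ?_
            intro k' hk'
            rw [PySem.Dict.getD_insert]
            by_cases hkk : k' = k
            · simp [hkk]
            · rw [if_neg hkk]
              rw [PySem.Dict.contains_insert] at hk'
              simp [hkk] at hk'
              exact lt_trans (hd k' hk') (by omega)

-- with the rule absent, A's loop body is the identity on the state
lemma stepA_no_rule (rules : List String) (hr : rules.contains "no_duplicate_keys" = false)
    (st : List (String × String × String) × PySem.Dict String Int) (p : Int × String) :
    stepA rules st p = st := by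
  rw [stepA_eq]
  cases keyOf? p.2 with
  | none => rfl
  | some k => simp only [hr, Bool.false_eq_true, if_false]

-- a fold of the identity-on-state loop body is the identity
lemma foldl_stepA_no_rule (rules : List String) (hr : rules.contains "no_duplicate_keys" = false)
    (l : List (Int × String)) (st : List (String × String × String) × PySem.Dict String Int) :
    l.foldl (stepA rules) st = st := by
  induction l generalizing st with
  | nil => rfl
  | cons x xs ih => rw [List.foldl_cons, stepA_no_rule rules hr, ih]

-- ===== VERDICT (by name: the statement is the Claim_ definition above) =====
theorem lint_lines_spec : Claim_equal_lint_lines := by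
  intro lines rules _
  unfold Spec_lint_lines
  by_cases hr : (rules.getD LINT_RULES).contains "no_duplicate_keys" = true
  · rw [lint_lines_eq_stepA, lint_lines_alt_eq lines rules hr]
    exact main_inv (rules.getD LINT_RULES) hr lines 1 PySem.Dict.empty []
      (by intro k hk; simp [PySem.Dict.empty] at hk)
  · rw [lint_lines_eq_stepA,
      foldl_stepA_no_rule _ (Bool.not_eq_true _ ▸ hr) (PySem.List.enumerate lines 1)]
    unfold lint_lines_alt
    rw [if_pos (by exact hr)]
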